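-- pv_equiv track=rewrite | github.com/Nitingarg01/Majorproject | backend/ai_services.py | _get_next_topic
-- ===== SOURCE A (Python) =====
-- def _get_next_topic(section_config, conversation_history):
--     """Get the next topic to explore in the current section"""
--     # Find topics already covered
--     covered_topics = set()
--     for entry in conversation_history:
--         if entry.get('type') == 'question' and entry.get('topic'):
--             covered_topics.add(entry['topic'])
--
--     # Return first uncovered topic
--     for topic in section_config['topics']:
--         if topic not in covered_topics:
--             return topic
--
--     # If all topics covered, return the first one (for potential follow-ups)
--     return section_config['topics'][0]
-- ===== SOURCE B (Python) =====
-- def _get_next_topic(section_config, conversation_history):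
--     """Get the next topic to explore in the current section"""
--     topics = section_config['topics']
--     # Return the first topic no question-entry with a truthy topic field mentions
--     for topic in topics:
--         if not any(e.get('type') == 'question' and e.get('topic') and e['topic'] == topic
--                    for e in conversation_history):
--             return topic
--     # All topics covered: return the first one (for potential follow-ups)
--     return topics[0]
-- ===== Notes on version B (the rewrite author's own statement) =====
-- stated objective: alternative
-- what changed: B drops A's precomputed covered-topics set and instead scans the conversation history directly for each topic, returning the first topic no truthy question entry mentions.
import Mathlib
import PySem

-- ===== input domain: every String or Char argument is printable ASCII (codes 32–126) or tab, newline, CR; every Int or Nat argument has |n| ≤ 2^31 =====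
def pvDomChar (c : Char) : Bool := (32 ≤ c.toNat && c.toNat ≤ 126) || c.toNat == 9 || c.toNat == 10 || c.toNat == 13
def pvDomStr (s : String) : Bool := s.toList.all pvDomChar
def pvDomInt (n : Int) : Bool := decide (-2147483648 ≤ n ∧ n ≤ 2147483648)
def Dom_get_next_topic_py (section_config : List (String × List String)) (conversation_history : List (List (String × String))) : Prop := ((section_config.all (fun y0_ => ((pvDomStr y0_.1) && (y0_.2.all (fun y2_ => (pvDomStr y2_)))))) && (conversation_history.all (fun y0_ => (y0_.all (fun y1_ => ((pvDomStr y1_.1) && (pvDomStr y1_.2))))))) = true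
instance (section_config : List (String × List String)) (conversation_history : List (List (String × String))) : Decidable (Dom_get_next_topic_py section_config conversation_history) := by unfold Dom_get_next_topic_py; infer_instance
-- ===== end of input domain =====

-- B replaces A's precomputed covered-set with a per-topic scan of the history (alternative decomposition, no speed claim).

-- dict.get(k) on an association list: first match (shared helper of both ports)
def pvLook {α : Type} (d : List (String × α)) (k : String) : Option α :=
  (d.find? (fun p => p.1 == k)).map (fun p => p.2)

-- ===== PORT A =====
-- step of A's first loop: add entry['topic'] when type == 'question' and topic truthy (nonempty)
def aStep (s : PySem.Set String) (e : List (String × String)) : PySem.Set String :=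
  match pvLook e "type", pvLook e "topic" with
  | some t, some tp => if t == "question" && tp != "" then PySem.Set.add s tp else s
  | _, _ => s

def get_next_topic_py (section_config : List (String × List String)) (conversation_history : List (List (String × String))) : String :=
  let covered := conversation_history.foldl aStep PySem.Set.empty
  match pvLook section_config "topics" with
  | none => ""  -- KeyError in Python; excluded by Pre_
  | some topics =>
    match topics.find? (fun t => !(PySem.Set.contains covered t)) with
    | some t => t
    | none => topics.headD ""  -- [] would be IndexError; excluded by Pre_

-- ===== PORT B =====
-- does this entry e cover topic t? (question entry with a truthy topic field equal to t)
def bPred (t : String) (e : List (String × String)) : Bool :=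
  pvLook e "type" == some "question" &&
  (match pvLook e "topic" with
   | some tp => tp != "" && tp == t
   | none => false)

-- does some entry of the history cover t?
def bCovered (t : String) (conversation_history : List (List (String × String))) : Bool :=
  conversation_history.any (bPred t)

-- B's loop with early return
def bLoop (conversation_history : List (List (String × String))) : List String → Option String
  | [] => none
  | t :: ts => if bCovered t conversation_history then bLoop conversation_history ts else some t

def get_next_topic_py_alt (section_config : List (String × List String)) (conversation_history : List (List (String × String))) : String :=
  match pvLook section_config "topics" with
  | none => ""  -- KeyError in Python; excluded by Pre_
  | some topics =>
    match bLoop conversation_history topics with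
    | some t => t
    | none => topics.headD ""  -- [] would be IndexError; excluded by Pre_

-- ===== PRECONDITION & SPEC =====
-- Pre_ excludes exactly the inputs where Python A raises: no 'topics' key (KeyError) or an empty topics list (IndexError on topics[0]).
def Pre_get_next_topic_py (section_config : List (String × List String)) (conversation_history : List (List (String × String))) : Prop :=
  (pvLook section_config "topics").getD [] ≠ []
instance (section_config : List (String × List String)) (conversation_history : List (List (String × String))) : Decidable (Pre_get_next_topic_py section_config conversation_history) := by unfold Pre_get_next_topic_py; infer_instance
def pvWitness_get_next_topic_py : (List (String × List String)) × (List (List (String × String))) :=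
  ([("topics", ["a", "b"])], [[("type", "question"), ("topic", "a")]])

def Spec_get_next_topic_py (section_config : List (String × List String)) (conversation_history : List (List (String × String))) (out : String) : Prop := out = get_next_topic_py_alt section_config conversation_history
instance (section_config : List (String × List String)) (conversation_history : List (List (String × String))) (out : String) : Decidable (Spec_get_next_topic_py section_config conversation_history out) := by unfold Spec_get_next_topic_py; infer_instance

-- ===== CLAIM (what is proved, stated in full; the proofs are below) =====
def Claim_equal_get_next_topic_py : Prop := ∀ (section_config : List (String × List String)) (conversation_history : List (List (String × String))), Dom_get_next_topic_py section_config conversation_history → Pre_get_next_topic_py section_config conversation_history → Spec_get_next_topic_py section_config conversation_history (get_next_topic_py section_config conversation_history)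

-- ===== LEMMAS AND PROOFS =====

-- one step of A's covered-set loop, characterised pointwise
theorem mem_aStep (s : PySem.Set String) (e : List (String × String)) (t : String) :
    t ∈ aStep s e ↔ t ∈ s ∨ bPred t e = true := by
  unfold aStep bPred
  rcases hty : pvLook e "type" with _ | ty <;> rcases htp : pvLook e "topic" with _ | tp <;> simp
  by_cases hq : ty = "question"
  · by_cases he : tp = ""
    · simp [hq, he]
    · simp [hq, he, PySem.Set.mem_add s tp t]
      constructor
      · rintro (h | h)
        · exact Or.inl h
        · exact Or.inr h.symm
      · rintro (h | h)
        · exact Or.inl h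
        · exact Or.inr h.symm
  · simp [hq]

-- membership in A's accumulated covered-set = B's per-topic scan
theorem mem_foldl_aStep (ch : List (List (String × String))) (s : PySem.Set String) (t : String) :
    t ∈ ch.foldl aStep s ↔ t ∈ s ∨ bCovered t ch = true := by
  induction ch generalizing s with
  | nil => simp [bCovered]
  | cons e ch ih =>
    rw [List.foldl_cons, ih, mem_aStep]
    simp [bCovered, or_assoc]

theorem contains_covered (ch : List (List (String × String))) (t : String) :
    PySem.Set.contains (ch.foldl aStep PySem.Set.empty) t = bCovered t ch := by
  rw [Bool.eq_iff_iff, PySem.Set.contains_iff, mem_foldl_aStep]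
  simp [PySem.Set.empty]

-- B's early-return loop is List.find? with the negated covered test
theorem bLoop_eq_find (ch : List (List (String × String))) (topics : List String) :
    bLoop ch topics = topics.find? (fun t => !(bCovered t ch)) := by
  induction topics with
  | nil => rfl
  | cons t ts ih =>
    rw [bLoop]
    cases h : bCovered t ch <;> simp [h, ih]

-- ===== VERDICT (by name: the statement is the Claim_ definition above) =====
theorem get_next_topic_py_spec : Claim_equal_get_next_topic_py := by
  intro sc ch _ _
  unfold Spec_get_next_topic_py get_next_topic_py get_next_topic_py_alt
  have hf : (fun t => !(PySem.Set.contains (List.foldl aStep PySem.Set.empty ch) t))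
      = (fun t => !(bCovered t ch)) := funext fun t => by rw [contains_covered]
  rcases h : pvLook sc "topics" with _ | topics
  · rfl
  · simp only [hf, bLoop_eq_find]
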